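-- pv_equiv track=rewrite | github.com/Valps/gta2-gmp-rotator | opcodes.py | get_next_numeric_param
-- ===== SOURCE A (Python) =====
-- def get_next_numeric_param(line):
--     """Get the next parameter as number. It also returns the string position after it.
--
--     If the line has ended after that number, it will return -1 as second return value.
--
--     If there are not numbers until the end of line, the function will return (None, -2). This
--     is the case of optional parameters that doesn't exists.
--     """
--     number_str = ""
--     for i, chr in enumerate(line):
--         if not chr.isdigit():
--             if len(number_str) != 0:
--                 return ( int(number_str) , i )
--             continue
--         number_str += chr
--
--     if number_str:
--         return ( int(number_str) , -1 )  # last param: end of line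
--     else:
--         return ( None , -2 )       # optional var doesn't exist
-- ===== SOURCE B (Python) =====
-- def get_next_numeric_param(line):
--     start = next((i for i, c in enumerate(line) if c.isdigit()), None)
--     if start is None:
--         return (None, -2)
--     tail = line[start:]
--     rel = next((j for j, c in enumerate(tail) if not c.isdigit()), len(tail))
--     end = start + rel
--     return (int(line[start:end]), -1 if end == len(line) else end)
-- ===== Notes on version B (the rewrite author's own statement) =====
-- stated objective: simpler
-- what changed: Replaces the accumulator loop with early return by an index computation: find the first digit index and the end of the digit run, then slice once and convert; no character-by-character string building.
import Mathlib
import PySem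

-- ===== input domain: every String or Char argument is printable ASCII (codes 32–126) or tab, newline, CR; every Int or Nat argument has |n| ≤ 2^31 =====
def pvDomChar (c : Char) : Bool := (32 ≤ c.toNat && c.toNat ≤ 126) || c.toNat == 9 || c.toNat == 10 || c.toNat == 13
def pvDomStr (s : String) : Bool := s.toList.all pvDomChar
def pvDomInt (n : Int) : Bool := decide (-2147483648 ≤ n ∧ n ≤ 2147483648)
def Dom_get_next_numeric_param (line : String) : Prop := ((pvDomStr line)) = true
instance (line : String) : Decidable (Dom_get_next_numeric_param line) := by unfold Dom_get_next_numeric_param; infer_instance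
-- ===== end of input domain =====

-- B replaces A's accumulator loop (with its early return) by computing the first digit index and
-- the end of the digit run, then slicing once and converting; a simpler decomposition of the same task.

-- ===== PORT A =====
-- A's for-loop: index i, accumulated digit characters acc (A's number_str)
def pvGoA (cs : List Char) (i : Nat) (acc : List Char) : Option Int × Int :=
  match cs with
  | [] => if acc.length ≠ 0 then (PySem.Int.ofChars? acc, -1) else (none, -2)
  | c :: rest =>
    if ¬ PySem.Chars.isdigit c then
      if acc.length ≠ 0 then (PySem.Int.ofChars? acc, (i : Int))
      else pvGoA rest (i + 1) acc
    else pvGoA rest (i + 1) (acc ++ [c])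

def get_next_numeric_param (line : String) : Option Int × Int :=
  pvGoA line.toList 0 []

-- ===== PORT B =====
def get_next_numeric_param_alt (line : String) : Option Int × Int :=
  let cs := line.toList
  match cs.findIdx? (fun c => PySem.Chars.isdigit c) with
  | none => (none, -2)
  | some start =>
    let tail := PySem.List.slice cs (some (start : Int)) none     -- line[start:]
    let rel := match tail.findIdx? (fun c => ¬ PySem.Chars.isdigit c) with
               | none => tail.length
               | some j => j
    let e := start + rel
    (PySem.Int.ofChars? (PySem.List.slice cs (some (start : Int)) (some ((e : Int)))),
     if e = cs.length then -1 else (e : Int))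

-- ===== PRECONDITION & SPEC =====
def Spec_get_next_numeric_param (line : String) (out : Option Int × Int) : Prop := out = get_next_numeric_param_alt line
instance (line : String) (out : Option Int × Int) : Decidable (Spec_get_next_numeric_param line out) := by unfold Spec_get_next_numeric_param; infer_instance

-- ===== CLAIM (what is proved, stated in full; the proofs are below) =====
def Claim_equal_get_next_numeric_param : Prop := ∀ (line : String), Dom_get_next_numeric_param line → Spec_get_next_numeric_param line (get_next_numeric_param line)

-- ===== LEMMAS AND PROOFS =====

theorem pvGoA_cons_digit (c : Char) (rest : List Char) (i : Nat) (acc : List Char)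
    (hc : PySem.Chars.isdigit c = true) :
    pvGoA (c :: rest) i acc = pvGoA rest (i+1) (acc ++ [c]) := by
  rw [pvGoA.eq_def]; simp [hc]

theorem pvGoA_cons_notdigit (c : Char) (rest : List Char) (i : Nat) (acc : List Char)
    (hc : ¬ PySem.Chars.isdigit c = true) (h : acc ≠ []) :
    pvGoA (c :: rest) i acc = (PySem.Int.ofChars? acc, (i : Int)) := by
  rw [pvGoA.eq_def]; simp [hc, h]

theorem pvGoA_cons_notdigit_nil (c : Char) (rest : List Char) (i : Nat)
    (hc : ¬ PySem.Chars.isdigit c = true) :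
    pvGoA (c :: rest) i [] = pvGoA rest (i+1) [] := by
  rw [pvGoA.eq_def]; simp [hc]

-- once A has seen at least one digit, its loop consumes the rest of the digit run and stops
theorem pvGoA_digits (cs : List Char) (i : Nat) (acc : List Char) (h : acc ≠ []) :
    pvGoA cs i acc =
      (PySem.Int.ofChars? (acc ++ cs.takeWhile (fun c => PySem.Chars.isdigit c)),
       if (cs.takeWhile (fun c => PySem.Chars.isdigit c)).length = cs.length then (-1 : Int)
       else ((i + (cs.takeWhile (fun c => PySem.Chars.isdigit c)).length : Nat) : Int)) := by
  induction cs generalizing i acc with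
  | nil =>
    rw [pvGoA.eq_def]
    simp [List.length_eq_zero_iff, h]
  | cons c rest ih =>
    by_cases hc : PySem.Chars.isdigit c
    · rw [pvGoA_cons_digit c rest i acc hc, ih (i+1) (acc ++ [c]) (by simp),
        List.takeWhile_cons_of_pos (by simpa using hc)]
      refine Prod.ext ?_ ?_
      · simp
      · simp only [List.length_cons]
        by_cases hlen : (rest.takeWhile (fun c => PySem.Chars.isdigit c)).length = rest.length
        · rw [if_pos hlen, if_pos (by simp [hlen])]
        · rw [if_neg hlen, if_neg (by simpa using hlen)]
          push_cast; ring
    · rw [pvGoA_cons_notdigit c rest i acc hc h,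
        List.takeWhile_cons_of_neg (by simpa using hc)]
      refine Prod.ext ?_ ?_
      · simp
      · simp

-- B's result over the character list, with the running start offset i of A's loop
def pvBgenI (cs : List Char) (i : Nat) : Option Int × Int :=
  Option.elim (cs.findIdx? (fun c => PySem.Chars.isdigit c)) (none, -2) (fun s =>
    let tw := (cs.drop s).takeWhile (fun c => PySem.Chars.isdigit c)
    (PySem.Int.ofChars? tw,
     if s + tw.length = cs.length then -1 else ((i + s + tw.length : Nat) : Int)))

theorem pvGoA_eq_pvBgenI (cs : List Char) : ∀ (i : Nat), pvGoA cs i [] = pvBgenI cs i := by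
  induction cs with
  | nil => intro i; rw [pvGoA.eq_def]; simp [pvBgenI]
  | cons c rest ih =>
    intro i
    by_cases hc : PySem.Chars.isdigit c
    · rw [pvGoA_cons_digit c rest i [] hc, pvGoA_digits rest (i+1) ([] ++ [c]) (by simp)]
      have hc' : (fun c => PySem.Chars.isdigit c) c = true := by simpa using hc
      simp only [pvBgenI, List.findIdx?_cons, hc', if_pos, Option.elim_some, List.drop_zero,
        List.takeWhile_cons_of_pos hc', List.length_cons, List.nil_append, List.singleton_append,
        show (fun c => PySem.Chars.isdigit c) = PySem.Chars.isdigit from rfl]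
      refine Prod.ext rfl ?_
      by_cases hlen : (rest.takeWhile PySem.Chars.isdigit).length = rest.length
      · rw [if_pos hlen, if_pos (by omega)]
      · rw [if_neg hlen, if_neg (by omega)]
        push_cast; ring
    · rw [pvGoA_cons_notdigit_nil c rest i hc, ih (i+1)]
      have hc' : ¬ (fun c => PySem.Chars.isdigit c) c = true := by simpa using hc
      simp only [pvBgenI, List.findIdx?_cons, if_neg hc']
      cases hfi : rest.findIdx? (fun c => PySem.Chars.isdigit c) with
      | none => simp
      | some s =>
        simp only [Option.map_some, Option.elim_some, List.drop_succ_cons, List.length_cons]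
        refine Prod.ext rfl ?_
        by_cases hlen : s + ((rest.drop s).takeWhile (fun c => PySem.Chars.isdigit c)).length = rest.length
        · rw [if_pos hlen, if_pos (by omega)]
        · rw [if_neg hlen, if_neg (by omega)]
          push_cast; ring

-- the offset computed from findIdx? over the negated predicate is the digit-run length
theorem pvRel_eq_takeWhile_length (l : List Char) :
    (match l.findIdx? (fun c => ¬ PySem.Chars.isdigit c) with
     | none => l.length
     | some j => j) = (l.takeWhile (fun c => PySem.Chars.isdigit c)).length := by
  induction l with
  | nil => simp
  | cons c rest ih =>
    by_cases hc : PySem.Chars.isdigit c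
    · simp only [List.findIdx?_cons]
      rw [if_neg (by simpa using hc), List.takeWhile_cons_of_pos (by simpa using hc)]
      cases hfi : rest.findIdx? (fun c => ¬ PySem.Chars.isdigit c) with
      | none => simp only [hfi, Option.map_none, List.length_cons]; rw [hfi] at ih; simpa using ih
      | some j => simp only [hfi, Option.map_some, List.length_cons]; rw [hfi] at ih; simpa using ih
    · simp only [List.findIdx?_cons]
      rw [if_pos (by simpa using hc), List.takeWhile_cons_of_neg (by simpa using hc)]
      rfl

theorem alt_eq_pvBgenI (line : String) :
    get_next_numeric_param_alt line = pvBgenI line.toList 0 := by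
  unfold get_next_numeric_param_alt pvBgenI
  cases hfi : line.toList.findIdx? (fun c => PySem.Chars.isdigit c) with
  | none => simp [hfi]
  | some s =>
    simp only [hfi, Option.elim_some]
    rw [PySem.List.slice_from_natCast]
    rw [pvRel_eq_takeWhile_length]
    set tw := (line.toList.drop s).takeWhile (fun c => PySem.Chars.isdigit c) with htw
    have hslice : PySem.List.slice line.toList (some (s : Int)) (some ((s : Int) + (tw.length : Int)))
        = tw := by
      rw [PySem.List.slice_natCast_add, htw]
      exact (List.prefix_iff_eq_take.mp (List.takeWhile_prefix _)).symm
    rw [show ((s + tw.length : Nat) : Int) = ((s : Int) + (tw.length : Int)) from by push_cast; ring]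
    rw [hslice]
    refine Prod.ext rfl ?_
    simp

-- ===== VERDICT (by name: the statement is the Claim_ definition above) =====
theorem get_next_numeric_param_spec : Claim_equal_get_next_numeric_param := by
  intro line _
  unfold Spec_get_next_numeric_param
  unfold get_next_numeric_param
  rw [pvGoA_eq_pvBgenI, alt_eq_pvBgenI]
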